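-- pv_equiv track=rewrite | github.com/ms-jpq/coq_nvim | coq/shared/parse.py | coalesce
-- ===== SOURCE A (Python) =====
-- from typing import (
--     AbstractSet,
--     AsyncIterator,
--     Iterable,
--     Iterator,
--     MutableSequence,
--     Sequence,
--     Union,
-- )
--
-- def is_word(char: str, unifying_chars: AbstractSet[str]) -> bool:
--     return char in unifying_chars or char.isalnum()
--
-- def coalesce(chars: Iterable[str], unifying_chars: AbstractSet[str]) -> Iterator[str]:
--     words: MutableSequence[str] = []
--     syms: MutableSequence[str] = []
--
--     def wit() -> Iterator[str]:
--         if words: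
--             word = "".join(words)
--             words.clear()
--             yield word
--
--     def sit() -> Iterator[str]:
--         if syms:
--             sym = "".join(syms)
--             syms.clear()
--             yield sym
--
--     for char in chars:
--         if is_word(char, unifying_chars=unifying_chars):
--             words.append(char)
--             yield from sit()
--         elif not char.isspace():
--             syms.append(char)
--             yield from wit()
--         else:
--             yield from wit()
--             yield from sit()
--
--     yield from wit()
--     yield from sit()
-- ===== SOURCE B (Python) =====
-- from itertools import groupby
--
--
-- def _classify(char, unifying_chars):
--     if char in unifying_chars or char.isalnum():
--         return "word"
--     elif char.isspace():
--         return "space"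
--     else:
--         return "sym"
--
--
-- def coalesce(chars, unifying_chars):
--     for key, group in groupby(chars, key=lambda c: _classify(c, unifying_chars)):
--         if key != "space":
--             yield "".join(group)
-- ===== Notes on version B (the rewrite author's own statement) =====
-- stated objective: idiomatic
-- what changed: Replaces the two mutable buffers with their flush-the-opposite-buffer bookkeeping by classifying each char as word/space/sym and run-grouping with itertools.groupby, yielding the join of each non-space run.
import Mathlib
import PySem

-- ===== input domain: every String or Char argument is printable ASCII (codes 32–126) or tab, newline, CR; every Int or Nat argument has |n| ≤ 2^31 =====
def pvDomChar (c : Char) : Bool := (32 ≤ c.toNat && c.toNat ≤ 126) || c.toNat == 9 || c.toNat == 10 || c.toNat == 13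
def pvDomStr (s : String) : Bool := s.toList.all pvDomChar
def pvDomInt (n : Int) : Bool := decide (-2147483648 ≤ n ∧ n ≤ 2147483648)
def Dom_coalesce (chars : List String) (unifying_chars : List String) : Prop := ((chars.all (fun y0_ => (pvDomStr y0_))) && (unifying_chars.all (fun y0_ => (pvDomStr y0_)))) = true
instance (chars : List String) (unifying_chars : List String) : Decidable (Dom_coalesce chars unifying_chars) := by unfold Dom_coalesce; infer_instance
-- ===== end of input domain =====

-- B replaces A's two mutable buffers and flush-the-opposite-buffer logic by
-- classifying each char (word/space/sym) and run-grouping à la itertools.groupby,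
-- emitting the join of each non-space run (objective: more idiomatic, same cost).

-- ===== PORT A =====
-- is_word(char, unifying_chars)
def pvIsWord (c : String) (u : List String) : Bool :=
  u.contains c || PySem.Str.strIsalnum c

-- ''.join(buf) flushed as zero-or-one yielded strings (wit() / sit())
def pvFlush (b : List String) : List String :=
  if b.isEmpty then [] else [PySem.Str.join "" b]

-- one iteration of A's for-loop over state (yielded, words, syms)
def pvStepA (u : List String) (st : List String × List String × List String)
    (c : String) : List String × List String × List String :=
  if pvIsWord c u then
    (st.1 ++ pvFlush st.2.2, st.2.1 ++ [c], [])
  else if PySem.Str.strIsspace c = false then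
    (st.1 ++ pvFlush st.2.1, [], st.2.2 ++ [c])
  else
    (st.1 ++ pvFlush st.2.1 ++ pvFlush st.2.2, [], [])

def coalesce (chars : List String) (unifying_chars : List String) : List String :=
  let st := chars.foldl (pvStepA unifying_chars) ([], [], [])
  st.1 ++ pvFlush st.2.1 ++ pvFlush st.2.2

-- ===== PORT B =====
-- _classify: 0 = "word", 1 = "space", 2 = "sym" (same branch priority as Source B)
def pvClassify (c : String) (u : List String) : Nat :=
  if u.contains c || PySem.Str.strIsalnum c then 0
  else if PySem.Str.strIsspace c then 1
  else 2

-- the groupby loop: take the maximal run with the head's key, join it, keep it unless space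
def pvRuns (u : List String) : List String → List String
  | [] => []
  | c :: rest =>
    let k := pvClassify c u
    let run := rest.takeWhile (fun x => pvClassify x u == k)
    let rest' := rest.dropWhile (fun x => pvClassify x u == k)
    if k ≠ 1 then PySem.Str.join "" (c :: run) :: pvRuns u rest'
    else pvRuns u rest'
termination_by l => l.length
decreasing_by
  all_goals
    have h := List.length_dropWhile_le (fun x => pvClassify x u == pvClassify c u) rest
    simp only [List.length_cons]
    omega

def coalesce_alt (chars : List String) (unifying_chars : List String) : List String :=
  pvRuns unifying_chars chars

-- ===== PRECONDITION & SPEC =====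
def Spec_coalesce (chars : List String) (unifying_chars : List String) (out : List String) : Prop := out = coalesce_alt chars unifying_chars
instance (chars : List String) (unifying_chars : List String) (out : List String) : Decidable (Spec_coalesce chars unifying_chars out) := by unfold Spec_coalesce; infer_instance

-- ===== CLAIM (what is proved, stated in full; the proofs are below) =====
def Claim_equal_coalesce : Prop := ∀ (chars : List String) (unifying_chars : List String), Dom_coalesce chars unifying_chars → Spec_coalesce chars unifying_chars (coalesce chars unifying_chars)

-- ===== LEMMAS AND PROOFS =====

lemma pvTakeDrop_split (p : String → Bool) (b rest : List String)
    (h1 : ∀ x ∈ b, p x = true) (h2 : ∀ x ∈ rest.head?, p x = false) :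
    (b ++ rest).takeWhile p = b ∧ (b ++ rest).dropWhile p = rest := by
  induction b with
  | nil =>
    cases rest with
    | nil => simp
    | cons d rest' =>
      have hd := h2 d (by simp)
      simp [hd]
  | cons a b' ih =>
    have ha := h1 a (by simp)
    have := ih (fun x hx => h1 x (by simp [hx]))
    simp [ha, this.1, this.2]

-- a nonempty same-class non-space run at the front is emitted as its join
lemma pvRuns_front (u : List String) (k : Nat) (hk1 : k ≠ 1)
    (b : List String) (hb : b ≠ []) (hall : ∀ x ∈ b, pvClassify x u = k)
    (rest : List String) (hrest : ∀ x ∈ rest.head?, pvClassify x u ≠ k) :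
    pvRuns u (b ++ rest) = PySem.Str.join "" b :: pvRuns u rest := by
  cases b with
  | nil => exact absurd rfl hb
  | cons c b' =>
    have hc : pvClassify c u = k := hall c (by simp)
    have hsplit := pvTakeDrop_split (fun x => pvClassify x u == k) b' rest
      (fun x hx => by simp [hall x (by simp [hx])])
      (fun x hx => by simp [hrest x hx])
    rw [List.cons_append, pvRuns]
    simp only [hc, hsplit.1, hsplit.2, if_pos hk1]

lemma pvRuns_dropSpace (u : List String) :
    ∀ n (cs : List String), cs.length ≤ n →
    pvRuns u (cs.dropWhile (fun x => pvClassify x u == 1)) = pvRuns u cs := by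
  intro n
  induction n with
  | zero => intro cs h; simp at h; simp [h]
  | succ n ih =>
    intro cs h
    cases cs with
    | nil => simp
    | cons c cs' =>
      by_cases hc : pvClassify c u = 1
      · have hlen : cs'.length ≤ n := by simp at h; omega
        have hd : List.dropWhile (fun x => pvClassify x u == 1) (c :: cs')
            = List.dropWhile (fun x => pvClassify x u == 1) cs' := by
          simp [hc]
        rw [hd, ih cs' hlen]
        conv_rhs => rw [pvRuns]
        simp [hc, ih cs' hlen]
      · rw [List.dropWhile_cons_of_neg (by simp [hc])]

lemma pvRuns_space_cons (u : List String) (c : String) (cs : List String)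
    (hc : pvClassify c u = 1) : pvRuns u (c :: cs) = pvRuns u cs := by
  rw [pvRuns]
  simp [hc, pvRuns_dropSpace u cs.length cs le_rfl]

lemma pvClassify_word (u : List String) (c : String) (h : pvIsWord c u = true) :
    pvClassify c u = 0 := by
  simp [pvIsWord] at h; simp [pvClassify, h]

lemma pvClassify_space (u : List String) (c : String) (hw : pvIsWord c u = false)
    (hs : PySem.Str.strIsspace c = true) : pvClassify c u = 1 := by
  have hs' : PySem.Chars.strIsspace c.toList = true := by simpa using hs
  simp [pvIsWord] at hw; simp [pvClassify, hw.1, hw.2, hs']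

lemma pvClassify_sym (u : List String) (c : String) (hw : pvIsWord c u = false)
    (hs : PySem.Str.strIsspace c = false) : pvClassify c u = 2 := by
  have hs' : PySem.Chars.strIsspace c.toList = false := by simpa using hs
  simp [pvIsWord] at hw; simp [pvClassify, hw.1, hw.2, hs']

-- main invariant: A's loop from state (acc, w, s) — buffers single-class, at most one
-- nonempty — produces acc followed by B's runs of the pending buffer and the rest
lemma pvLoop_eq (u : List String) :
    ∀ (chars : List String) (acc w s : List String),
    (∀ x ∈ w, pvClassify x u = 0) → (∀ x ∈ s, pvClassify x u = 2) → (w = [] ∨ s = []) →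
    (let st := chars.foldl (pvStepA u) (acc, w, s)
     st.1 ++ pvFlush st.2.1 ++ pvFlush st.2.2) = acc ++ pvRuns u (w ++ s ++ chars) := by
  intro chars
  induction chars with
  | nil =>
    intro acc w s hw hs hor
    rcases hor with h | h
    · subst h
      cases s with
      | nil => simp [pvFlush, pvRuns]
      | cons d s' =>
        have hfr := pvRuns_front u 2 (by decide) (d :: s') (by simp) hs [] (by simp)
        simp only [List.append_nil] at hfr
        simp [pvFlush, hfr, pvRuns]
    · subst h
      cases w with
      | nil => simp [pvFlush, pvRuns]
      | cons d w' =>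
        have hfr := pvRuns_front u 0 (by decide) (d :: w') (by simp) hw [] (by simp)
        simp only [List.append_nil] at hfr
        simp [pvFlush, hfr, pvRuns]
  | cons c cs ih =>
    intro acc w s hw hs hor
    by_cases hcw : pvIsWord c u = true
    · -- word char: flush syms, extend words
      have hc0 : pvClassify c u = 0 := pvClassify_word u c hcw
      have step : pvStepA u (acc, w, s) c = (acc ++ pvFlush s, w ++ [c], []) := by
        simp [pvStepA, hcw]
      rw [List.foldl_cons, step]
      have ihres := ih (acc ++ pvFlush s) (w ++ [c]) []
        (by intro x hx; rcases List.mem_append.1 hx with h | h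
            · exact hw x h
            · simp at h; subst h; exact hc0)
        (by simp) (Or.inr rfl)
      rw [ihres]
      rcases hor with h | h
      · subst h
        cases s with
        | nil => simp [pvFlush]
        | cons d s' =>
          have hfr := pvRuns_front u 2 (by decide) (d :: s') (by simp) hs (c :: cs)
            (by intro x hx; simp at hx; subst hx; simp [hc0])
          simp only [List.cons_append] at hfr
          simp [pvFlush, hfr]
      · subst h
        simp [pvFlush]
    · by_cases hcs : PySem.Str.strIsspace c = true
      · -- space char: flush both
        have hc1 : pvClassify c u = 1 :=
          pvClassify_space u c (by simp [Bool.not_eq_true] at hcw ⊢; exact hcw) hcs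
        have hcs' : PySem.Chars.strIsspace c.toList = true := by simpa using hcs
        have step : pvStepA u (acc, w, s) c
            = (acc ++ pvFlush w ++ pvFlush s, [], []) := by
          simp [pvStepA, hcw, hcs']
        rw [List.foldl_cons, step]
        have ihres := ih (acc ++ pvFlush w ++ pvFlush s) [] [] (by simp) (by simp)
          (Or.inl rfl)
        rw [ihres]
        rcases hor with h | h
        · subst h
          cases s with
          | nil => simp [pvFlush, pvRuns_space_cons u c cs hc1]
          | cons d s' =>
            have hfr := pvRuns_front u 2 (by decide) (d :: s') (by simp) hs (c :: cs)
              (by intro x hx; simp at hx; subst hx; simp [hc1])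
            simp only [List.cons_append] at hfr
            simp [pvFlush, hfr, pvRuns_space_cons u c cs hc1]
        · subst h
          cases w with
          | nil => simp [pvFlush, pvRuns_space_cons u c cs hc1]
          | cons d w' =>
            have hfr := pvRuns_front u 0 (by decide) (d :: w') (by simp) hw (c :: cs)
              (by intro x hx; simp at hx; subst hx; simp [hc1])
            simp only [List.cons_append] at hfr
            simp [pvFlush, hfr, pvRuns_space_cons u c cs hc1]
      · -- symbol char: flush words, extend syms
        have hc2 : pvClassify c u = 2 :=
          pvClassify_sym u c (by simp [Bool.not_eq_true] at hcw ⊢; exact hcw)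
            (by simp [Bool.not_eq_true] at hcs ⊢; exact hcs)
        have hcs' : PySem.Chars.strIsspace c.toList = false := by simpa using hcs
        have step : pvStepA u (acc, w, s) c = (acc ++ pvFlush w, [], s ++ [c]) := by
          simp [pvStepA, hcw, hcs']
        rw [List.foldl_cons, step]
        have ihres := ih (acc ++ pvFlush w) [] (s ++ [c]) (by simp)
          (by intro x hx; rcases List.mem_append.1 hx with h | h
              · exact hs x h
              · simp at h; subst h; exact hc2)
          (Or.inl rfl)
        rw [ihres]
        rcases hor with h | h
        · subst h
          simp [pvFlush]
        · subst h
          cases w with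
          | nil => simp [pvFlush]
          | cons d w' =>
            have hfr := pvRuns_front u 0 (by decide) (d :: w') (by simp) hw (c :: cs)
              (by intro x hx; simp at hx; subst hx; simp [hc2])
            simp only [List.cons_append] at hfr
            simp [pvFlush, hfr]

-- ===== VERDICT (by name: the statement is the Claim_ definition above) =====
theorem coalesce_spec : Claim_equal_coalesce := by
  intro chars u _
  unfold Spec_coalesce coalesce coalesce_alt
  have := pvLoop_eq u chars [] [] [] (by simp) (by simp) (Or.inl rfl)
  simpa using this
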